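-- pv_equiv track=rewrite | github.com/soji-omiwade/algorithms | before_rubrik/print_reverse_diagonals.py | print_reverse_diagonals
-- ===== SOURCE A (Python) =====
-- def print_reverse_diagonals(a):
--     res=[]
--     m=len(a)
--     n=len(a[0])
--     for j in range(n-1,-1,-1):
--         for i in range(min(m,n-j)):
--             res.append(a[i][j+i])
--     for i in range(1,m):
--         for j in range(min(m-i,n)):
--             res.append(a[j+i][j])
--     return res
-- ===== SOURCE B (Python) =====
-- def print_reverse_diagonals(a):
--     m = len(a)
--     n = len(a[0])
--     buckets = {}
--     for i in range(m):
--         row = a[i]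
--         for j in range(n):
--             buckets.setdefault(j - i, []).append(row[j])
--     res = []
--     for d in range(n - 1, -m, -1):
--         res.extend(buckets.get(d, []))
--     return res
-- ===== Notes on version B (the rewrite author's own statement) =====
-- stated objective: alternative
-- what changed: A walks each diagonal explicitly with two separate nested index loops; B makes one row-major pass collecting cells into a dict of buckets keyed by j-i and then concatenates the buckets for keys n-1 down to -(m-1).
import Mathlib
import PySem

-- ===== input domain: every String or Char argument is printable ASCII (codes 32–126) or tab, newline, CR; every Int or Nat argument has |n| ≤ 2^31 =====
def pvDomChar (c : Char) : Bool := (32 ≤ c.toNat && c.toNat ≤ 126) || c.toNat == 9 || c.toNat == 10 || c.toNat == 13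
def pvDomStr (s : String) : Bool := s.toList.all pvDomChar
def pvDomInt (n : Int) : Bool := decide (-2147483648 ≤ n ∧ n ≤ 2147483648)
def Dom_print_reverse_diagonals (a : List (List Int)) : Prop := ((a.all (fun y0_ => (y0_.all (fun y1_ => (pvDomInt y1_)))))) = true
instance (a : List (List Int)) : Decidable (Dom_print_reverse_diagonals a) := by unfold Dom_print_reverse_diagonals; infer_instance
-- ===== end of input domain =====

-- B collects cells into diagonal buckets (a dict keyed by j-i) in one row-major pass,
-- instead of A's two explicit nested diagonal-walking loops; same cost, different structure.

-- ===== PORT A =====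
def print_reverse_diagonals (a : List (List Int)) : List Int :=
  let m : Int := a.length
  let n : Int := (PySem.List.pyGetD a 0 []).length
  let res : List Int :=
    (PySem.List.pyRange (n - 1) (-1) (-1)).foldl (fun res j =>
      (PySem.List.pyRange 0 (min m (n - j)) 1).foldl (fun res i =>
        res ++ [PySem.List.pyGetD (PySem.List.pyGetD a i []) (j + i) 0]) res) []
  (PySem.List.pyRange 1 m 1).foldl (fun res i =>
    (PySem.List.pyRange 0 (min (m - i) n) 1).foldl (fun res j =>
      res ++ [PySem.List.pyGetD (PySem.List.pyGetD a (j + i) []) j 0]) res) res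

-- ===== PORT B =====
def print_reverse_diagonals_alt (a : List (List Int)) : List Int :=
  let m : Int := a.length
  let n : Int := (PySem.List.pyGetD a 0 []).length
  let buckets : PySem.Dict Int (List Int) :=
    (PySem.List.pyRange 0 m 1).foldl (fun b i =>
      let row := PySem.List.pyGetD a i []
      (PySem.List.pyRange 0 n 1).foldl (fun b j =>
        b.insert (j - i) (b.getD (j - i) [] ++ [PySem.List.pyGetD row j 0])) b)
      PySem.Dict.empty
  (PySem.List.pyRange (n - 1) (-m) (-1)).foldl (fun res d => res ++ buckets.getD d []) []

-- ===== PRECONDITION & SPEC =====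
-- Pre_ excludes exactly the inputs on which the Python A raises IndexError:
-- the empty list (a[0]) and matrices with some row shorter than row 0 (a[i][j] out of range).
def Pre_print_reverse_diagonals (a : List (List Int)) : Prop :=
  a ≠ [] ∧ ∀ row ∈ a, (a.getD 0 []).length ≤ row.length
instance (a : List (List Int)) : Decidable (Pre_print_reverse_diagonals a) := by
  unfold Pre_print_reverse_diagonals; infer_instance
def pvWitness_print_reverse_diagonals : List (List Int) := [[1, 2], [3, 4]]

def Spec_print_reverse_diagonals (a : List (List Int)) (out : List Int) : Prop := out = print_reverse_diagonals_alt a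
instance (a : List (List Int)) (out : List Int) : Decidable (Spec_print_reverse_diagonals a out) := by unfold Spec_print_reverse_diagonals; infer_instance

-- ===== CLAIM (what is proved, stated in full; the proofs are below) =====
def Claim_equal_print_reverse_diagonals : Prop := ∀ (a : List (List Int)), Dom_print_reverse_diagonals a → Pre_print_reverse_diagonals a → Spec_print_reverse_diagonals a (print_reverse_diagonals a)

-- ===== LEMMAS AND PROOFS =====


def pvG (a : List (List Int)) (i c : Int) : Int :=
  PySem.List.pyGetD (PySem.List.pyGetD a i []) c 0

def pvDiag (a : List (List Int)) (n d : Int) : List Int :=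
  (PySem.List.pyRange 0 (a.length : Int) 1).flatMap
    (fun i => if 0 ≤ i + d ∧ i + d < n then [pvG a i (i + d)] else [])

-- nested append-singleton loops flatten to flatMap of maps
theorem pvFoldlNested {α β : Type} (l : List α) (g : α → List β) (h : α → β → Int)
    (init : List Int) :
    l.foldl (fun acc x => (g x).foldl (fun acc2 y => acc2 ++ [h x y]) acc) init
      = init ++ l.flatMap (fun x => (g x).map (h x)) := by
  induction l generalizing init with
  | nil => simp
  | cons x t ih =>
    rw [List.foldl_cons, PySem.List.foldl_append_singleton_eq_map, ih]
    simp

theorem pvFlatMapSingleton {α : Type} (l : List α) (f : α → List Int) (v : α → Int)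
    (h : ∀ x ∈ l, f x = [v x]) : l.flatMap f = l.map v := by
  induction l with
  | nil => simp
  | cons x t ih =>
    simp only [List.flatMap_cons, List.map_cons, h x (by simp)]
    rw [ih (fun y hy => h y (by simp [hy]))]
    rfl

theorem pvBucket1 (cols : List Int) (key v : Int → Int)
    (b0 : PySem.Dict Int (List Int)) (k : Int) :
    (cols.foldl (fun b j => b.insert (key j) (b.getD (key j) [] ++ [v j])) b0).getD k []
      = b0.getD k [] ++ (cols.filter (fun j => key j == k)).map v := by
  induction cols generalizing b0 with
  | nil => simp
  | cons j t ih =>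
    simp only [List.foldl_cons, ih, List.filter_cons]
    by_cases h : key j = k
    · simp [h]
    · simp [h, PySem.Dict.getD_insert, Ne.symm h]

theorem pvBucket2 (rows cols : List Int) (val : Int → Int → Int)
    (b0 : PySem.Dict Int (List Int)) (k : Int) :
    (rows.foldl (fun b i =>
        cols.foldl (fun b j => b.insert (j - i) (b.getD (j - i) [] ++ [val i j])) b) b0).getD k []
      = b0.getD k [] ++ rows.flatMap (fun i => (cols.filter (fun j => j - i == k)).map (val i)) := by
  induction rows generalizing b0 with
  | nil => simp
  | cons i t ih =>
    simp only [List.foldl_cons, ih, List.flatMap_cons, pvBucket1, List.append_assoc]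

theorem pvFilterRange (n i d : Int) :
    (PySem.List.pyRange 0 n 1).filter (fun j => j - i == d)
      = if 0 ≤ i + d ∧ i + d < n then [i + d] else [] := by
  have hc : (fun j => j - i == d) = (fun j => j == i + d) := by
    funext j
    by_cases h : j = i + d
    · simp [h]
    · simp [h]; omega
  rw [hc, List.filter_beq]
  by_cases h : 0 ≤ i + d ∧ i + d < n
  · rw [List.count_eq_one_of_mem (PySem.List.nodup_pyRange_one 0 n)
      (by rw [PySem.List.mem_pyRange_one]; omega)]
    simp [h]
  · rw [List.count_eq_zero_of_not_mem
      (by rw [PySem.List.mem_pyRange_one]; omega)]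
    simp [h]

theorem pvRange_neg_one_append (a c b : Int) (h1 : b ≤ c) (h2 : c ≤ a) :
    PySem.List.pyRange a b (-1) = PySem.List.pyRange a c (-1) ++ PySem.List.pyRange c b (-1) := by
  rw [PySem.List.pyRange_neg_one_eq_reverse, PySem.List.pyRange_neg_one_eq_reverse,
    PySem.List.pyRange_neg_one_eq_reverse, ← List.reverse_append,
    ← PySem.List.pyRange_one_append (b + 1) (c + 1) (a + 1) (by omega) (by omega)]

theorem pvFlatMapCongrMem {α : Type} (l : List α) (f g : α → List Int)
    (h : ∀ x ∈ l, f x = g x) : l.flatMap f = l.flatMap g := by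
  induction l with
  | nil => rfl
  | cons x t ih =>
    simp only [List.flatMap_cons, h x (by simp)]
    rw [ih (fun y hy => h y (by simp [hy]))]

theorem pvDiag_nonneg (a : List (List Int)) (n d : Int) (h0 : 0 ≤ d) (h1 : d < n) :
    pvDiag a n d
      = (PySem.List.pyRange 0 (min (a.length : Int) (n - d)) 1).map (fun i => pvG a i (d + i)) := by
  have hm0 : (0 : Int) ≤ (a.length : Int) := Int.natCast_nonneg _
  unfold pvDiag
  rw [PySem.List.pyRange_one_append 0 (min (a.length : Int) (n - d)) (a.length : Int)
    (by omega) (by omega), List.flatMap_append]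
  rw [pvFlatMapSingleton _ _ (fun i => pvG a i (i + d)) (by
    intro x hx
    rw [PySem.List.mem_pyRange_one] at hx
    rw [if_pos (by omega)])]
  rw [List.flatMap_eq_nil_iff.mpr (by
    intro x hx
    rw [PySem.List.mem_pyRange_one] at hx
    rw [if_neg (by omega)]), List.append_nil]
  exact List.map_congr_left (fun i _ => by rw [Int.add_comm])

theorem pvDiag_neg (a : List (List Int)) (n i0 : Int) (h1 : 1 ≤ i0)
    (h2 : i0 ≤ (a.length : Int)) (hn : 0 ≤ n) :
    pvDiag a n (-i0)
      = (PySem.List.pyRange 0 (min ((a.length : Int) - i0) n) 1).map (fun j => pvG a (j + i0) j) := by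
  have hm0 : (0 : Int) ≤ (a.length : Int) := Int.natCast_nonneg _
  unfold pvDiag
  rw [PySem.List.pyRange_one_append 0 i0 (a.length : Int) (by omega) h2,
    PySem.List.pyRange_one_append i0 (min (a.length : Int) (i0 + n)) (a.length : Int)
      (by omega) (by omega),
    List.flatMap_append, List.flatMap_append]
  rw [List.flatMap_eq_nil_iff.mpr (by
    intro x hx
    rw [PySem.List.mem_pyRange_one] at hx
    rw [if_neg (by omega)]), List.nil_append]
  rw [pvFlatMapSingleton _ _ (fun i => pvG a i (i + -i0)) (by
    intro x hx
    rw [PySem.List.mem_pyRange_one] at hx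
    rw [if_pos (by omega)])]
  rw [List.flatMap_eq_nil_iff.mpr (by
    intro x hx
    rw [PySem.List.mem_pyRange_one] at hx
    rw [if_neg (by omega)]), List.append_nil]
  rw [PySem.List.pyRange_one i0 (min (a.length : Int) (i0 + n)),
    PySem.List.pyRange_one 0 (min ((a.length : Int) - i0) n), List.map_map, List.map_map]
  have he : (min (a.length : Int) (i0 + n) - i0).toNat = (min ((a.length : Int) - i0) n - 0).toNat := by
    omega
  rw [he]
  apply List.map_congr_left
  intro k _
  show pvG a (i0 + (k : Int)) (i0 + (k : Int) + -i0) = pvG a (0 + (k : Int) + i0) (0 + (k : Int))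
  rw [show i0 + (k : Int) + -i0 = 0 + (k : Int) from by omega,
    show i0 + (k : Int) = 0 + (k : Int) + i0 from by omega]

theorem pvLB (a : List (List Int)) :
    print_reverse_diagonals_alt a
      = (PySem.List.pyRange (((PySem.List.pyGetD a 0 []).length : Int) - 1) (-(a.length : Int)) (-1)).flatMap
          (pvDiag a ((PySem.List.pyGetD a 0 []).length : Int)) := by
  simp only [print_reverse_diagonals_alt]
  rw [PySem.List.foldl_append_eq_flatMap]
  rw [List.nil_append]
  apply pvFlatMapCongrMem
  intro d _
  rw [pvBucket2]
  show [] ++ _ = _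
  rw [List.nil_append]
  unfold pvDiag
  apply pvFlatMapCongrMem
  intro i _
  rw [pvFilterRange]
  by_cases h : 0 ≤ i + d ∧ i + d < ((PySem.List.pyGetD a 0 []).length : Int)
  · rw [if_pos h, if_pos h]; rfl
  · rw [if_neg h, if_neg h]; rfl

theorem pvLA (a : List (List Int)) (ha : a ≠ []) :
    print_reverse_diagonals a
      = (PySem.List.pyRange (((PySem.List.pyGetD a 0 []).length : Int) - 1) (-(a.length : Int)) (-1)).flatMap
          (pvDiag a ((PySem.List.pyGetD a 0 []).length : Int)) := by
  have hm1 : (1 : Int) ≤ (a.length : Int) := by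
    have : a.length ≠ 0 := by simpa using ha
    omega
  have hn0 : (0 : Int) ≤ ((PySem.List.pyGetD a 0 []).length : Int) := Int.natCast_nonneg _
  simp only [print_reverse_diagonals]
  rw [pvFoldlNested, pvFoldlNested, List.nil_append]
  rw [pvRange_neg_one_append (((PySem.List.pyGetD a 0 []).length : Int) - 1) (-1)
    (-(a.length : Int)) (by omega) (by omega), List.flatMap_append]
  congr 1
  · -- nonnegative keys: A's first loop
    apply Eq.symm
    apply pvFlatMapCongrMem
    intro d hd
    rw [PySem.List.mem_pyRange_neg_one] at hd
    rw [pvDiag_nonneg a _ d (by omega) (by omega)]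
    simp only [pvG]
  · -- negative keys: A's second loop
    rw [PySem.List.pyRange_neg_one (-1) (-(a.length : Int)),
      PySem.List.pyRange_one 1 (a.length : Int)]
    rw [show (-1 - -(a.length : Int)).toNat = ((a.length : Int) - 1).toNat from by omega]
    rw [List.flatMap_map, List.flatMap_map]
    apply Eq.symm
    apply pvFlatMapCongrMem
    intro k hk
    rw [List.mem_range] at hk
    have hk' : (k : Int) < (a.length : Int) - 1 := by omega
    show pvDiag _ _ (-1 - (k : Int)) = _
    rw [show (-1 - (k : Int)) = -(1 + (k : Int)) from by omega]
    rw [pvDiag_neg a _ (1 + (k : Int)) (by omega) (by omega) hn0]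
    simp only [pvG]

-- ===== VERDICT (by name: the statement is the Claim_ definition above) =====
theorem print_reverse_diagonals_spec : Claim_equal_print_reverse_diagonals := by
  intro a _ hpre
  unfold Spec_print_reverse_diagonals
  rw [pvLA a hpre.1, pvLB a]
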